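-- pv_equiv track=rewrite | github.com/sicsempatyrannis/Hackarank-Leetcode | Decode String - Leetcode.py | repeated_element
-- ===== SOURCE A (Python) =====
-- def repeated_element(substring):
--
--     opened = 1
--
--     for i, j in enumerate(substring):
--         if j == '[':
--             opened += 1
--
--         elif j == ']':
--             opened -= 1
--             if opened == 0:
--                 curr_index = i
--
--                 return substring[:curr_index]
-- ===== SOURCE B (Python) =====
-- def _close(s, i):
--     """Return the index just past the ']' that closes the bracket implicitly
--     open at position i, skipping each nested '[...]' group by a recursive
--     call; None if the string ends first."""
--     while i < len(s):
--         c = s[i]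
--         if c == ']':
--             return i + 1
--         if c == '[':
--             i = _close(s, i + 1)
--             if i is None:
--                 return None
--         else:
--             i += 1
--     return None
--
-- def repeated_element(substring):
--     j = _close(substring, 0)
--     return None if j is None else substring[:j - 1]
-- ===== Notes on version B (the rewrite author's own statement) =====
-- stated objective: alternative
-- what changed: Replaced A's flat depth-counter scan by a recursive-descent matcher: a helper finds the index just past the closing bracket of one implicitly open bracket, skipping each nested bracket group with a recursive call instead of counting depth.
import Mathlib
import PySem

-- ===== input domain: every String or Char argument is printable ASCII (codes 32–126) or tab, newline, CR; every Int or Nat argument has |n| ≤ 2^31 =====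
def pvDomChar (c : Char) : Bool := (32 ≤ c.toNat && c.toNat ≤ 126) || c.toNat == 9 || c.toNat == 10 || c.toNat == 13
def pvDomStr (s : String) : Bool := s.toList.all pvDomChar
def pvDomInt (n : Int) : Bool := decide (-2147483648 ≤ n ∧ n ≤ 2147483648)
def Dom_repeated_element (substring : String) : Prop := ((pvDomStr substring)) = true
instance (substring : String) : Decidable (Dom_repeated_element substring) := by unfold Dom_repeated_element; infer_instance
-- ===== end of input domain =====

-- B replaces A's depth-counter scan by a recursive-descent matcher (a helper that skips
-- each nested bracket group by a recursive call); objective: alternative, same cost.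

-- ===== PORT A =====
-- A's loop: enumerate with an 'opened' counter starting at 1; at the first closer bringing
-- it to 0, return substring[:i]; falling off the loop is Python's implicit return of None.
def repAuxA : List Char → Int → Nat → Option Nat
  | [], _, _ => none
  | j :: rest, opened, i =>
    if j = '[' then repAuxA rest (opened + 1) (i + 1)
    else if j = ']' then
      let opened' := opened - 1
      if opened' = 0 then some i else repAuxA rest opened' (i + 1)
    else repAuxA rest opened (i + 1)

def repeated_element (substring : String) : Option String :=
  match repAuxA substring.toList 1 0 with
  | some i => some (String.ofList (substring.toList.take i))   -- substring[:curr_index]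
  | none => none                                               -- implicit 'return None'

-- ===== PORT B =====
-- _close(s, i): index just past the closing bracket of the bracket implicitly open at i;
-- the while loop becomes recursion, with a fuel argument only to make it total in Lean
-- (fuel = length of the string always suffices, see the lemmas below).
def closeAux (l : List Char) : Nat → Nat → Option Nat
  | _, 0 => none
  | i, f + 1 =>
    match l[i]? with
    | none => none                                   -- while condition i < len(s) fails
    | some c =>
      if c = ']' then some (i + 1)
      else if c = '[' then
        match closeAux l (i + 1) f with              -- skip the nested group
        | none => none
        | some j => closeAux l j f                   -- resume looking for our own closer
      else closeAux l (i + 1) f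

def repeated_element_alt (substring : String) : Option String :=
  match closeAux substring.toList 0 substring.toList.length with
  | none => none
  | some j => some (String.ofList (substring.toList.take (j - 1)))  -- substring[:j-1]

-- ===== PRECONDITION & SPEC =====
def Spec_repeated_element (substring : String) (out : Option String) : Prop := out = repeated_element_alt substring
instance (substring : String) (out : Option String) : Decidable (Spec_repeated_element substring out) := by unfold Spec_repeated_element; infer_instance

-- ===== CLAIM (what is proved, stated in full; the proofs are below) =====
def Claim_equal_repeated_element : Prop := ∀ (substring : String), Dom_repeated_element substring → Spec_repeated_element substring (repeated_element substring)

-- ===== LEMMAS AND PROOFS =====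

-- closeAux returns an index strictly past its start and within the string
theorem closeAux_bounds (l : List Char) : ∀ (f i j : Nat),
    closeAux l i f = some j → i < j ∧ j ≤ l.length := by
  intro f
  induction f with
  | zero => intro i j h; simp [closeAux] at h
  | succ f ih =>
    intro i j h
    unfold closeAux at h
    cases hg : l[i]? with
    | none => rw [hg] at h; simp at h
    | some c =>
      have hil : i < l.length := by
        by_contra hge
        rw [List.getElem?_eq_none (by omega)] at hg; simp at hg
      rw [hg] at h
      by_cases hc1 : c = ']'
      · simp [hc1] at h; omega
      · by_cases hc2 : c = '['
        · simp [hc2] at h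
          cases h1 : closeAux l (i + 1) f with
          | none => rw [h1] at h; simp at h
          | some j1 =>
            rw [h1] at h
            have b1 := ih (i + 1) j1 h1
            have b2 := ih j1 j h
            omega
        · simp [hc1, hc2] at h
          have := ih (i + 1) j h
          omega

-- Bridge: A's counter scan from position i at depth d equals B's matcher composed d times
-- (stated for one composition step; enough fuel is any f ≥ l.length - i).
theorem repAuxA_eq_closeAux (l : List Char) : ∀ (f i : Nat) (d : Int), 1 ≤ d →
    l.length - i ≤ f →
    repAuxA (l.drop i) d i =
      match closeAux l i f with
      | none => none
      | some j => if d = 1 then some (j - 1) else repAuxA (l.drop j) (d - 1) j := by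
  intro f
  induction f with
  | zero =>
    intro i d hd hf
    have : l.length ≤ i := by omega
    rw [List.drop_eq_nil_of_le this]
    simp [repAuxA, closeAux]
  | succ f ih =>
    intro i d hd hf
    by_cases hil : i < l.length
    · have hdrop : l.drop i = l[i] :: l.drop (i + 1) := List.drop_eq_getElem_cons hil
      have hg : l[i]? = some l[i] := List.getElem?_eq_getElem hil
      rw [hdrop]
      unfold closeAux
      rw [hg]
      by_cases hc2 : l[i] = '['
      · -- opened += 1, continue
        have hc1 : ¬ (l[i] = ']') := by rw [hc2]; decide
        rw [show repAuxA (l[i] :: l.drop (i + 1)) d i = repAuxA (l.drop (i + 1)) (d + 1) (i + 1) from by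
          simp [repAuxA, hc2]]
        rw [ih (i + 1) (d + 1) (by omega) (by omega)]
        have hne : ¬ ((d + 1 : Int) = 1) := by omega
        simp only [hc2, if_true]
        cases h1 : closeAux l (i + 1) f with
        | none => simp
        | some j1 =>
          simp only [hne, if_false]
          have b1 := closeAux_bounds l f (i + 1) j1 h1
          rw [ih j1 (d + 1 - 1) (by omega) (by omega)]
          have : (d + 1 - 1 : Int) = d := by omega
          rw [this]
          simp
      · by_cases hc1 : l[i] = ']'
        · by_cases h0 : d = 1
          · rw [show repAuxA (l[i] :: l.drop (i + 1)) d i = some i from by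
              simp [repAuxA, hc1, h0]]
            simp [hc1, h0]
          · rw [show repAuxA (l[i] :: l.drop (i + 1)) d i = repAuxA (l.drop (i + 1)) (d - 1) (i + 1) from by
              have : ¬ (d - 1 = 0) := by omega
              simp [repAuxA, hc1, this]]
            simp [hc1, h0]
        · rw [show repAuxA (l[i] :: l.drop (i + 1)) d i = repAuxA (l.drop (i + 1)) d (i + 1) from by
            simp [repAuxA, hc1, hc2]]
          rw [ih (i + 1) d hd (by omega)]
          simp [hc1, hc2]
    · rw [List.drop_eq_nil_of_le (by omega)]
      unfold closeAux
      rw [List.getElem?_eq_none (by omega)]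
      simp [repAuxA]

-- ===== VERDICT (by name: the statement is the Claim_ definition above) =====
theorem repeated_element_spec : Claim_equal_repeated_element := by
  unfold Claim_equal_repeated_element
  intro s _
  unfold Spec_repeated_element repeated_element repeated_element_alt
  have h := repAuxA_eq_closeAux s.toList s.toList.length 0 1 (by omega) (by omega)
  simp only [List.drop_zero] at h
  rw [h]
  cases hc : closeAux s.toList 0 s.toList.length with
  | none => rfl
  | some j => simp
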